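-- pv_equiv track=rewrite | github.com/hasanahmvd/CS1026B | Labs/Lab6/task4/task.py | zFirst
-- ===== SOURCE A (Python) =====
-- def zFirst(words):
--     # We will need two lists
--     zresult =[]
--     result =[]
--     for word in words:
--         if word.lower()[0] == 'z':
--             # If it does, add it to the first list
--             zresult.append(word)
--         else:
--             # Does not begin with a 'z'
--             result.append(word)
--
--     zresult.sort()
--     result.sort()
--     return zresult + result
-- ===== SOURCE B (Python) =====
-- def zFirst(words):
--     # Sort once, then stably split: z-starting words first, the rest after.
--     ordered = sorted(words)
--     return [w for w in ordered if w.lower()[0] == 'z'] + \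
--            [w for w in ordered if w.lower()[0] != 'z']
-- ===== Notes on version B (the rewrite author's own statement) =====
-- stated objective: simpler
-- what changed: Replaces the manual partition loop followed by two separate sorts with one sort of the whole list followed by two filters (z-starting words first), relying on filter commuting with sorting.
import Mathlib
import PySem

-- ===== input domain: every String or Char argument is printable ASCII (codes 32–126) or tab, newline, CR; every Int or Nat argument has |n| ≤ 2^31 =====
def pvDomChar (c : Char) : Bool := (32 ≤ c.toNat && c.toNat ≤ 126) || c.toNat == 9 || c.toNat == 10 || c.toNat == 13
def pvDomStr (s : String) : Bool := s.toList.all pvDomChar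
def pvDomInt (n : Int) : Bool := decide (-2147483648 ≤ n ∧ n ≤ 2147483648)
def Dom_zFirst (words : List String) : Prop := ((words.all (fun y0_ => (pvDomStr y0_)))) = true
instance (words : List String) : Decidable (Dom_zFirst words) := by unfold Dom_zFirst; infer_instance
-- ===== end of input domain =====

-- B sorts the whole list once and then splits it with two filters; A partitions first and sorts each part.
-- Equivalence is proved on lists of nonempty words (Pre_); on an empty word both Pythons raise IndexError.

-- ===== PORT A =====
-- word.lower()[0] == 'z'; on the admitted inputs (nonempty words) pyGet? is some, exact to Python
def pvStartsZ (word : String) : Bool :=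
  PySem.Str.pyGet? (PySem.Str.lower word) 0 == some 'z'

def zFirst (words : List String) : List String :=
  let st := words.foldl
    (fun (st : List String × List String) word =>
      if pvStartsZ word then (st.1 ++ [word], st.2) else (st.1, st.2 ++ [word]))
    ([], [])
  PySem.List.sorted st.1 (fun w => w) false ++ PySem.List.sorted st.2 (fun w => w) false

-- ===== PORT B =====
def zFirst_alt (words : List String) : List String :=
  let ordered := PySem.List.sorted words (fun w => w) false
  ordered.filter (fun w => pvStartsZ w) ++ ordered.filter (fun w => !pvStartsZ w)

-- ===== PRECONDITION & SPEC =====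
-- Pre_ excludes lists containing an empty word: there both A and B raise IndexError (w.lower()[0]).
def Pre_zFirst (words : List String) : Prop := ∀ w ∈ words, w ≠ ""
instance (words : List String) : Decidable (Pre_zFirst words) := by unfold Pre_zFirst; infer_instance
def pvWitness_zFirst : List String := ["Zoo", "apple", "zebra", "Banana"]

def Spec_zFirst (words : List String) (out : List String) : Prop := out = zFirst_alt words
instance (words : List String) (out : List String) : Decidable (Spec_zFirst words out) := by unfold Spec_zFirst; infer_instance

-- ===== CLAIM (what is proved, stated in full; the proofs are below) =====
def Claim_equal_zFirst : Prop := ∀ (words : List String), Dom_zFirst words → Pre_zFirst words → Spec_zFirst words (zFirst words)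

-- ===== LEMMAS AND PROOFS =====

-- A's single partition loop builds the two filters of the input.
theorem pvFoldPartition (words zs rs : List String) :
    words.foldl
      (fun (st : List String × List String) word =>
        if pvStartsZ word then (st.1 ++ [word], st.2) else (st.1, st.2 ++ [word]))
      (zs, rs)
    = (zs ++ words.filter (fun w => pvStartsZ w), rs ++ words.filter (fun w => !pvStartsZ w)) := by
  induction words generalizing zs rs with
  | nil => simp
  | cons w ws ih =>
    by_cases h : pvStartsZ w <;> simp [h, ih, List.append_assoc]

-- filtering a sorted list is sorting the filtered list
theorem pvFilterSorted (q : String → Bool) (words : List String) :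
    (PySem.List.sorted words (fun w => w) false).filter q
      = PySem.List.sorted (words.filter q) (fun w => w) false := by
  exact (PySem.List.sorted_id_eq_of_perm_of_pairwise _ _
    ((PySem.List.sorted_perm words (fun w => w) false).filter q)
    (List.Pairwise.filter q (PySem.List.sorted_pairwise words (fun w => w)))).symm

-- ===== VERDICT (by name: the statement is the Claim_ definition above) =====
theorem zFirst_spec : Claim_equal_zFirst := by
  intro words _ _
  unfold Spec_zFirst zFirst zFirst_alt
  simp only [pvFoldPartition words [] [], List.nil_append, pvFilterSorted]
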